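-- pv_equiv track=rewrite | github.com/NSI-Termianle-2021-2022/NSI-Premiere | Theme D/DM_pyramide/GASNIER_Gabriel_Pyramide.py | door_build
-- ===== SOURCE A (Python) =====
-- from math import ceil
--
-- def door_build(width_door : int, rank : int, width_mini_floor : int, mini_floor_advancement : int, door_line) -> str: #create the part of the line with door and the handle
--     count = 0
--     for i in range(width_door):
--         if rank >= 5 and mini_floor_advancement == ceil(((width_mini_floor - 2) / 2) + 1) and count == width_door-2:
--             return door_line + '$|'
--         door_line += '|'
--         count += 1
--     return door_line
-- ===== SOURCE B (Python) =====
-- def door_build(width_door: int, rank: int, width_mini_floor: int, mini_floor_advancement: int, door_line) -> str: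
--     # closed form: decide the handle condition once; ceil((w-2)/2 + 1) == -(-(w-2)//2) + 1 exactly
--     handle = rank >= 5 and mini_floor_advancement == -(-(width_mini_floor - 2) // 2) + 1
--     if handle and width_door >= 2:
--         return door_line + '|' * (width_door - 2) + '$|'
--     return door_line + '|' * width_door
-- ===== Notes on version B (the rewrite author's own statement) =====
-- stated objective: simpler
-- what changed: Replaced the char-by-char loop with per-iteration early-exit check by one upfront evaluation of the handle condition and a single closed-form string repetition.
import Mathlib
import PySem

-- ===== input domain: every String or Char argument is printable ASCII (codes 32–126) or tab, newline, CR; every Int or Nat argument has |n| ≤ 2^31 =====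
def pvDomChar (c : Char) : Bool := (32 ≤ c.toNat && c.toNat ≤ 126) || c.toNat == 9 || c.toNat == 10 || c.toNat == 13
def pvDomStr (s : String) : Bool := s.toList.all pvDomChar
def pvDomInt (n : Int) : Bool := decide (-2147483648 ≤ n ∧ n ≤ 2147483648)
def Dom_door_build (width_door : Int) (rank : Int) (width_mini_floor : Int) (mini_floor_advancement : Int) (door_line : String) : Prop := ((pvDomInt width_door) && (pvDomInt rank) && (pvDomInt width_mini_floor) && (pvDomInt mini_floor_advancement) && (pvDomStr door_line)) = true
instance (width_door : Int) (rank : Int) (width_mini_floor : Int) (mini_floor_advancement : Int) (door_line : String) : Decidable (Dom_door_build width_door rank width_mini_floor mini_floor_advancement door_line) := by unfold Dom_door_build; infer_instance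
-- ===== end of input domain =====

-- B evaluates the handle condition once and builds the line in closed form instead of A's per-char loop with early exit; same return value.
-- ===== PORT A =====
-- loop over range(width_door) with state (door_line, count); ceil(((w-2)/2)+1) is ported as
-- -((-(w-2)) // 2) + 1, exact for |w| <= 2^31 (float halving and +1 are exact there)
def doorLoopA (rank : Int) (width_mini_floor : Int) (mini_floor_advancement : Int) (width_door : Int) : Nat → String → Int → String
  | 0, door_line, _ => door_line
  | n+1, door_line, count =>
    if rank ≥ 5 ∧ mini_floor_advancement = -(PySem.Int.floordiv (-(width_mini_floor - 2)) 2) + 1 ∧ count = width_door - 2 then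
      door_line ++ "$|"
    else doorLoopA rank width_mini_floor mini_floor_advancement width_door n (door_line ++ "|") (count + 1)

def door_build (width_door : Int) (rank : Int) (width_mini_floor : Int) (mini_floor_advancement : Int) (door_line : String) : String :=
  doorLoopA rank width_mini_floor mini_floor_advancement width_door width_door.toNat door_line 0

-- ===== PORT B =====
-- '|' * n ported as String.ofList (List.replicate n.toNat '|') (Python repetition by a negative count is '')
def door_build_alt (width_door : Int) (rank : Int) (width_mini_floor : Int) (mini_floor_advancement : Int) (door_line : String) : String :=
  let handle := rank ≥ 5 ∧ mini_floor_advancement = -(PySem.Int.floordiv (-(width_mini_floor - 2)) 2) + 1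
  if handle ∧ width_door ≥ 2 then
    door_line ++ String.ofList (List.replicate (width_door - 2).toNat '|') ++ "$|"
  else
    door_line ++ String.ofList (List.replicate width_door.toNat '|')

-- ===== PRECONDITION & SPEC =====
def Spec_door_build (width_door : Int) (rank : Int) (width_mini_floor : Int) (mini_floor_advancement : Int) (door_line : String) (out : String) : Prop := out = door_build_alt width_door rank width_mini_floor mini_floor_advancement door_line
instance (width_door : Int) (rank : Int) (width_mini_floor : Int) (mini_floor_advancement : Int) (door_line : String) (out : String) : Decidable (Spec_door_build width_door rank width_mini_floor mini_floor_advancement door_line out) := by unfold Spec_door_build; infer_instance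

-- ===== CLAIM (what is proved, stated in full; the proofs are below) =====
def Claim_equal_door_build : Prop := ∀ (width_door : Int) (rank : Int) (width_mini_floor : Int) (mini_floor_advancement : Int) (door_line : String), Dom_door_build width_door rank width_mini_floor mini_floor_advancement door_line → Spec_door_build width_door rank width_mini_floor mini_floor_advancement door_line (door_build width_door rank width_mini_floor mini_floor_advancement door_line)

-- ===== LEMMAS AND PROOFS =====

-- ===== VERDICT (by name: the statement is the Claim_ definition above) =====
theorem mk_cons_append (s : String) (c : Char) (l : List Char) :
    s ++ String.ofList (c :: l) = (s ++ String.ofList [c]) ++ String.ofList l := by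
  apply String.ext
  simp

theorem doorLoopA_spec (rank width_mini_floor mini_floor_advancement width_door : Int) :
    ∀ (n : Nat) (door_line : String) (count : Int),
    doorLoopA rank width_mini_floor mini_floor_advancement width_door n door_line count =
      if (rank ≥ 5 ∧ mini_floor_advancement = -(PySem.Int.floordiv (-(width_mini_floor - 2)) 2) + 1)
          ∧ count ≤ width_door - 2 ∧ width_door - 2 < count + n then
        door_line ++ String.ofList (List.replicate (width_door - 2 - count).toNat '|') ++ "$|"
      else
        door_line ++ String.ofList (List.replicate n '|') := by
  intro n
  induction n with
  | zero =>
    intro dl count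
    rw [doorLoopA]
    rw [if_neg (by omega)]
    apply String.ext; simp
  | succ n ih =>
    intro dl count
    rw [doorLoopA]
    by_cases hP : rank ≥ 5 ∧ mini_floor_advancement = -(PySem.Int.floordiv (-(width_mini_floor - 2)) 2) + 1
    · by_cases hc : count = width_door - 2
      · rw [if_pos ⟨hP.1, hP.2, hc⟩, if_pos ⟨hP, by omega, by omega⟩]
        have : (width_door - 2 - count).toNat = 0 := by omega
        rw [this]
        apply String.ext; simp
      · rw [if_neg (by tauto), ih]
        by_cases htrig : count + 1 ≤ width_door - 2 ∧ width_door - 2 < count + 1 + n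
        · rw [if_pos ⟨hP, htrig⟩, if_pos ⟨hP, by omega, by push_cast; omega⟩]
          have h1 : (width_door - 2 - count).toNat = (width_door - 2 - (count + 1)).toNat + 1 := by omega
          rw [h1, List.replicate_succ, mk_cons_append]
          apply String.ext; simp
        · rw [if_neg (by tauto), if_neg (by push_cast; push_cast at htrig; omega)]
          rw [List.replicate_succ, mk_cons_append]
          apply String.ext; simp
    · rw [if_neg (by tauto), ih, if_neg (by tauto), if_neg (by tauto)]
      rw [List.replicate_succ, mk_cons_append]
      apply String.ext; simp

theorem door_build_spec : Claim_equal_door_build := by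
  intro wd rank wmf mfa dl _
  show _ = _
  rw [door_build, door_build_alt, doorLoopA_spec]
  by_cases hP : rank ≥ 5 ∧ mfa = -(PySem.Int.floordiv (-(wmf - 2)) 2) + 1
  · by_cases h2 : wd ≥ 2
    · rw [if_pos ⟨hP, by omega, by omega⟩]
      simp only [if_pos (show (rank ≥ 5 ∧ mfa = -(PySem.Int.floordiv (-(wmf - 2)) 2) + 1) ∧ wd ≥ 2 from ⟨hP, h2⟩)]
      have : wd - 2 - 0 = wd - 2 := by omega
      rw [this]
    · rw [if_neg (by omega)]
      simp only [if_neg (show ¬((rank ≥ 5 ∧ mfa = -(PySem.Int.floordiv (-(wmf - 2)) 2) + 1) ∧ wd ≥ 2) from by tauto)]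
  · rw [if_neg (by tauto)]
    simp only [if_neg (show ¬((rank ≥ 5 ∧ mfa = -(PySem.Int.floordiv (-(wmf - 2)) 2) + 1) ∧ wd ≥ 2) from by tauto)]
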